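-- pv_equiv track=rewrite | github.com/yaokunkun/Weld-GPT_demo | app/api/endpoints/intent_route_4080.py | parse_media_sequence
-- ===== SOURCE A (Python) =====
-- def parse_media_sequence(input_list):
--     media_sequence = []
--
--     for item in input_list:
--         parts = item.strip().split(' ')
--         if len(parts) < 1:
--             continue  # 忽略无效条目
--
--         local_url = parts[0]
--         original_url = ""  # 默认值
--
--         if len(parts) > 1:
--             original_url_candidate = parts[1]
--             if original_url_candidate != "None":
--                 original_url = original_url_candidate
--             else:
--                 original_url = ""
--
--         # 判断媒体类型
--         lower_local_url = local_url.lower()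
--         if any(lower_local_url.endswith(ext) for ext in ['.mp4', '.avi', '.mov', '.flv', '.wmv']):
--             media_type = "video"
--         elif any(lower_local_url.endswith(ext) for ext in ['.jpg', '.jpeg', '.png', '.gif', '.bmp', '.webp']):
--             media_type = "image"
--         else:
--             media_type = "unknown"
--
--         media_sequence.append({
--             "type": media_type,
--             "local_url": local_url,
--             "original_url": original_url
--         })
--
--     return media_sequence
-- ===== SOURCE B (Python) =====
-- VIDEO_EXTS = {'mp4', 'avi', 'mov', 'flv', 'wmv'}
-- IMAGE_EXTS = {'jpg', 'jpeg', 'png', 'gif', 'bmp', 'webp'}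
--
--
-- def parse_media_sequence(input_list):
--     media_sequence = []
--     for item in input_list:
--         local_url, _, rest = item.strip().partition(' ')
--         candidate = rest.partition(' ')[0]
--         original_url = '' if candidate == 'None' else candidate
--         u = local_url.lower()
--         dot = u.rfind('.')
--         ext = u[dot + 1:] if dot != -1 else ''
--         if ext in VIDEO_EXTS:
--             media_type = 'video'
--         elif ext in IMAGE_EXTS:
--             media_type = 'image'
--         else:
--             media_type = 'unknown'
--         media_sequence.append({
--             'type': media_type,
--             'local_url': local_url,
--             'original_url': original_url
--         })
--     return media_sequence
-- ===== Notes on version B (the rewrite author's own statement) =====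
-- stated objective: idiomatic
-- what changed: B never materializes the split-parts list and never scans the extension lists with endswith: it peels off the first two space-delimited fields with two str.partition(' ') calls and classifies by locating the last dot with rfind, slicing off the suffix and testing set membership.
import Mathlib
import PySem

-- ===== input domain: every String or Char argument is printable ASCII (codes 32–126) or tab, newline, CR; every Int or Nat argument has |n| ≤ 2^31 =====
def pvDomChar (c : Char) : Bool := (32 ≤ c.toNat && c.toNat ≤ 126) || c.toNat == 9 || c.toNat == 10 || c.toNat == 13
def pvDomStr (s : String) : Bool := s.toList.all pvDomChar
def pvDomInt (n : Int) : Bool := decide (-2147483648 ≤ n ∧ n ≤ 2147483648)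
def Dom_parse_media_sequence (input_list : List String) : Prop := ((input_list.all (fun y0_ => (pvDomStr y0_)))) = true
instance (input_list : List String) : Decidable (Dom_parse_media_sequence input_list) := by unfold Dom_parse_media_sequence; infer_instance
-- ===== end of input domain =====

-- B replaces A's split-into-parts list and per-extension endswith scans by two str.partition(' ')
-- calls peeling off the first two fields and an rfind('.')-suffix set-membership classification
-- (objective: idiomatic; same asymptotic cost).

-- ===== PORT A =====
-- item.strip().split(' ')
def pySplitSpace (s : String) : List String :=
  (PySem.Chars.splitOn (PySem.Chars.strip s.toList) [' ']).map String.ofList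

def videoExts : List String := [".mp4", ".avi", ".mov", ".flv", ".wmv"]
def imageExts : List String := [".jpg", ".jpeg", ".png", ".gif", ".bmp", ".webp"]

def parse_media_sequence (input_list : List String) : List (List (String × String)) :=
  input_list.foldl (fun media_sequence item =>
    let parts := pySplitSpace item
    if parts.length < 1 then media_sequence   -- continue (unreachable: split(' ') is never empty)
    else
      let local_url := parts.headD ""         -- parts[0]
      let original_url :=
        if parts.length > 1 then
          let original_url_candidate := (parts.drop 1).headD ""   -- parts[1]
          if original_url_candidate ≠ "None" then original_url_candidate else ""
        else ""
      let lower_local_url := PySem.Str.lower local_url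
      let media_type :=
        if videoExts.any (fun ext => PySem.Str.endswith lower_local_url ext) then "video"
        else if imageExts.any (fun ext => PySem.Str.endswith lower_local_url ext) then "image"
        else "unknown"
      media_sequence ++
        [[("type", media_type), ("local_url", local_url), ("original_url", original_url)]]) []

-- ===== PORT B =====
-- s.partition(' '): exact — (before first ' ', the separator if present, after it)
def pyPartitionSpace (s : List Char) : List Char × List Char × List Char :=
  if ' ' ∈ s then (s.takeWhile (fun c => c ≠ ' '), [' '], (s.dropWhile (fun c => c ≠ ' ')).tail)
  else (s, [], [])

-- the Python set literals of distinct extension strings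
def videoExtsB : List (List Char) :=
  PySem.Set.ofList ["mp4".toList, "avi".toList, "mov".toList, "flv".toList, "wmv".toList]
def imageExtsB : List (List Char) :=
  PySem.Set.ofList ["jpg".toList, "jpeg".toList, "png".toList, "gif".toList, "bmp".toList, "webp".toList]

def entryB (item : String) : List (String × String) :=
  let pr := pyPartitionSpace (PySem.Chars.strip item.toList)   -- item.strip().partition(' ')
  let local_url := pr.1
  let rest := pr.2.2
  let candidate := (pyPartitionSpace rest).1                   -- rest.partition(' ')[0]
  let original_url := if candidate = "None".toList then [] else candidate
  let u := PySem.Chars.lower local_url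
  let dot := PySem.Chars.rfind u ['.']
  let ext := if dot ≠ -1 then PySem.Chars.slice u (some (dot + 1)) none else []
  let media_type :=
    if ext ∈ videoExtsB then "video"
    else if ext ∈ imageExtsB then "image"
    else "unknown"
  [("type", media_type), ("local_url", String.ofList local_url),
   ("original_url", String.ofList original_url)]

def parse_media_sequence_alt (input_list : List String) : List (List (String × String)) :=
  input_list.foldl (fun media_sequence item => media_sequence ++ [entryB item]) []

-- ===== PRECONDITION & SPEC =====
def Spec_parse_media_sequence (input_list : List String) (out : List (List (String × String))) : Prop := out = parse_media_sequence_alt input_list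
instance (input_list : List String) (out : List (List (String × String))) : Decidable (Spec_parse_media_sequence input_list out) := by unfold Spec_parse_media_sequence; infer_instance

-- ===== CLAIM (what is proved, stated in full; the proofs are below) =====
def Claim_equal_parse_media_sequence : Prop := ∀ (input_list : List String), Dom_parse_media_sequence input_list → Spec_parse_media_sequence input_list (parse_media_sequence input_list)

-- ===== LEMMAS AND PROOFS =====

-- reference shape of split(' ') on chars
def splitSp : List Char → List (List Char)
  | [] => [[]]
  | c :: r =>
      if c = ' ' then [] :: splitSp r
      else match splitSp r with
        | [] => [[c]]
        | w :: ws => (c :: w) :: ws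

def consHead (pre : List Char) : List (List Char) → List (List Char)
  | [] => []
  | w :: ws => (pre ++ w) :: ws

lemma splitSp_ne_nil (s : List Char) : splitSp s ≠ [] := by
  cases s with
  | nil => simp [splitSp]
  | cons c r =>
    simp only [splitSp]
    split
    · simp
    · split <;> simp

lemma go_space (s : List Char) : ∀ (fuel : Nat) (cur : List Char) (acc : List (List Char)),
    s.length < fuel →
    PySem.Chars.splitOn.go [' '] fuel s cur acc = acc.reverse ++ consHead cur.reverse (splitSp s) := by
  induction s with
  | nil =>
    intro fuel cur acc h
    cases fuel with
    | zero => omega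
    | succ n => simp [PySem.Chars.splitOn.go, splitSp, consHead]
  | cons c r ih =>
    intro fuel cur acc h
    cases fuel with
    | zero => simp at h
    | succ n =>
      by_cases hc : c = ' '
      · subst hc
        have hpre : [' '].isPrefixOf (' ' :: r) = true := by simp [List.isPrefixOf]
        simp only [PySem.Chars.splitOn.go, hpre, if_true, List.length_cons, List.length_nil,
          List.drop_succ_cons, List.drop_zero]
        rw [ih n [] (cur.reverse :: acc) (by simp at h; omega)]
        cases hsp : splitSp r with
        | nil => exact absurd hsp (splitSp_ne_nil r)
        | cons w ws => simp [splitSp, consHead, hsp]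
      · have hpre : [' '].isPrefixOf (c :: r) = false := by
          simp only [List.isPrefixOf, Bool.and_eq_false_iff, beq_eq_false_iff_ne]
          exact Or.inl (fun h => hc h.symm)
        simp only [PySem.Chars.splitOn.go, hpre, Bool.false_eq_true, if_false]
        rw [ih n (c :: cur) acc (by simp at h ⊢; omega)]
        cases hsp : splitSp r with
        | nil => exact absurd hsp (splitSp_ne_nil r)
        | cons w ws => simp [splitSp, consHead, hsp, hc]

lemma splitOn_space (s : List Char) : PySem.Chars.splitOn s [' '] = splitSp s := by
  unfold PySem.Chars.splitOn
  rw [go_space s (s.length + 1) [] [] (by omega)]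
  cases hsp : splitSp s with
  | nil => exact absurd hsp (splitSp_ne_nil s)
  | cons w ws => simp [consHead]

lemma splitSp_eq (s : List Char) :
    splitSp s = if ' ' ∈ s then
        s.takeWhile (fun c => (c ≠ ' ' : Bool)) :: splitSp ((s.dropWhile (fun c => (c ≠ ' ' : Bool))).tail)
      else [s] := by
  induction s with
  | nil => simp [splitSp]
  | cons c r ih =>
    by_cases hc : c = ' '
    · subst hc; simp [splitSp]
    · have hc' : ¬ (' ' = c) := fun h => hc h.symm
      simp only [splitSp, hc, if_false]
      by_cases hr : ' ' ∈ r
      · rw [ih]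
        simp [hr, hc, hc']
      · rw [ih]
        simp [hr, hc']

lemma takeWhile_of_no_space (s : List Char) (h : ' ' ∉ s) :
    s.takeWhile (fun c => (c ≠ ' ' : Bool)) = s := by
  apply List.takeWhile_eq_self_iff.mpr
  intro a ha
  simp
  exact fun he => h (he ▸ ha)

lemma splitSp_head (s : List Char) :
    ∃ ws, splitSp s = s.takeWhile (fun c => (c ≠ ' ' : Bool)) :: ws := by
  rw [splitSp_eq]
  split
  · exact ⟨_, rfl⟩
  · next h => exact ⟨[], by rw [takeWhile_of_no_space s h]⟩

-- first component of partition(' ') is always the space-free prefix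
lemma part1_eq_takeWhile (s : List Char) :
    (pyPartitionSpace s).1 = s.takeWhile (fun c => (c ≠ ' ' : Bool)) := by
  unfold pyPartitionSpace
  split
  · rfl
  · next h => exact (takeWhile_of_no_space s h).symm

-- ===== the extension machinery =====

lemma takeWhile_append_dot (t s : List Char) (ht : ∀ c ∈ t, c ≠ '.') :
    (t ++ '.' :: s).takeWhile (fun c => (c ≠ '.' : Bool)) = t := by
  rw [List.takeWhile_append]
  simp_all

lemma ends_iff (u e : List Char) (he : ∀ c ∈ e, c ≠ '.') :
    PySem.Chars.endswith u ('.' :: e) = true ↔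
      '.' ∈ u ∧ (u.reverse.takeWhile (fun c => (c ≠ '.' : Bool))).reverse = e := by
  rw [PySem.Chars.endswith_iff]
  constructor
  · rintro ⟨t, rfl⟩
    refine ⟨by simp, ?_⟩
    have h1 : (t ++ '.' :: e).reverse = e.reverse ++ '.' :: t.reverse := by simp
    rw [h1, takeWhile_append_dot _ _ (by simpa using he)]
    simp
  · rintro ⟨hmem, heq⟩
    have hmr : '.' ∈ u.reverse := by simpa using hmem
    have htw : u.reverse.takeWhile (fun c => (c ≠ '.' : Bool)) = e.reverse := by
      rw [← heq]; simp
    have hdw : u.reverse.dropWhile (fun c => (c ≠ '.' : Bool)) ≠ [] := by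
      intro hnil
      have h0 := List.dropWhile_eq_nil_iff.mp hnil '.' hmr
      simp at h0
    cases hdd : u.reverse.dropWhile (fun c => (c ≠ '.' : Bool)) with
    | nil => exact absurd hdd hdw
    | cons d tl =>
      have hpd : d = '.' := by
        have h2 := List.head_dropWhile_not (fun c => (c ≠ '.' : Bool)) (l := u.reverse) hdw
        simp only [hdd] at h2
        simpa using h2
      have hsplit : u.reverse = e.reverse ++ '.' :: tl := by
        conv_lhs => rw [← List.takeWhile_append_dropWhile
          (p := fun c => (c ≠ '.' : Bool)) (l := u.reverse)]
        rw [htw, hdd, hpd]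
      rw [← List.reverse_prefix]
      exact ⟨tl, by rw [hsplit]; simp⟩

-- decomposition of u at its LAST dot
lemma last_dot_split (u : List Char) (hd : '.' ∈ u) :
    ∃ p, u = p ++ '.' :: (u.reverse.takeWhile (fun c => (c ≠ '.' : Bool))).reverse ∧
         '.' ∉ (u.reverse.takeWhile (fun c => (c ≠ '.' : Bool))).reverse := by
  have hmr : '.' ∈ u.reverse := by simpa using hd
  have hdw : u.reverse.dropWhile (fun c => (c ≠ '.' : Bool)) ≠ [] := by
    intro hnil
    have h0 := List.dropWhile_eq_nil_iff.mp hnil '.' hmr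
    simp at h0
  cases hdd : u.reverse.dropWhile (fun c => (c ≠ '.' : Bool)) with
  | nil => exact absurd hdd hdw
  | cons d tl =>
    have hpd : d = '.' := by
      have h2 := List.head_dropWhile_not (fun c => (c ≠ '.' : Bool)) (l := u.reverse) hdw
      simp only [hdd] at h2
      simpa using h2
    refine ⟨tl.reverse, ?_, ?_⟩
    · have hsplit : u.reverse = u.reverse.takeWhile (fun c => (c ≠ '.' : Bool)) ++ '.' :: tl := by
        conv_lhs => rw [← List.takeWhile_append_dropWhile
          (p := fun c => (c ≠ '.' : Bool)) (l := u.reverse)]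
        rw [hdd, hpd]
      have := congrArg List.reverse hsplit
      simpa using this
    · intro hmem
      have := List.mem_takeWhile_imp (by simpa using hmem)
      simp at this

lemma rgo_skip (s : List Char) (m : Nat) : ∀ (j : Nat), m ≤ j →
    ['.'].isPrefixOf (s.drop m) = true →
    (∀ i : Nat, m < i → i ≤ j → ['.'].isPrefixOf (s.drop i) = false) →
    PySem.Chars.rfind.go s ['.'] j = (m : Int) := by
  intro j
  induction j with
  | zero =>
    intro hm hmatch _
    have : m = 0 := by omega
    subst this
    simp only [List.drop_zero] at hmatch
    simp [PySem.Chars.rfind.go, hmatch]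
  | succ j ih =>
    intro hm hmatch hno
    by_cases he : m = j + 1
    · subst he
      simp [PySem.Chars.rfind.go, hmatch]
    · have hmj : m ≤ j := by omega
      have hcur : ['.'].isPrefixOf (s.drop (j + 1)) = false := hno (j + 1) (by omega) (le_refl _)
      simp only [PySem.Chars.rfind.go, hcur, Bool.false_eq_true, if_false]
      exact ih hmj hmatch (fun i h1 h2 => hno i h1 (by omega))

lemma rgo_none (s : List Char) : ∀ (j : Nat),
    (∀ i : Nat, i ≤ j → ['.'].isPrefixOf (s.drop i) = false) →
    PySem.Chars.rfind.go s ['.'] j = -1 := by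
  intro j
  induction j with
  | zero =>
    intro hno
    have := hno 0 (le_refl _)
    simp only [List.drop_zero] at this
    simp [PySem.Chars.rfind.go, this]
  | succ j ih =>
    intro hno
    have hcur := hno (j + 1) (le_refl _)
    simp only [PySem.Chars.rfind.go, hcur, Bool.false_eq_true, if_false]
    exact ih (fun i hi => hno i (by omega))

lemma rfind_last (p t : List Char) (ht : '.' ∉ t) :
    PySem.Chars.rfind (p ++ '.' :: t) ['.'] = (p.length : Int) := by
  unfold PySem.Chars.rfind
  apply rgo_skip
  · simp
  · rw [List.drop_left]
    simp [List.isPrefixOf]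
  · intro i h1 h2
    have hi : i = p.length + ((i - p.length - 1) + 1) := by omega
    rw [hi, ← List.drop_drop, List.drop_left, List.drop_succ_cons]
    rw [Bool.eq_false_iff]
    intro hpre
    rcases List.isPrefixOf_iff_prefix.mp hpre with ⟨rr, hr⟩
    have : '.' ∈ t.drop (i - p.length - 1) := by rw [← hr]; simp
    exact ht (List.drop_subset _ t this)

lemma rfind_no_dot (u : List Char) (hd : '.' ∉ u) :
    PySem.Chars.rfind u ['.'] = -1 := by
  unfold PySem.Chars.rfind
  apply rgo_none
  intro i _
  rw [Bool.eq_false_iff]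
  intro hpre
  have : '.' ∈ u.drop i := by
    rcases List.isPrefixOf_iff_prefix.mp hpre with ⟨r, hr⟩
    rw [← hr]; simp
  exact hd (List.drop_subset i u this)

-- the classification agreement
set_option maxRecDepth 8192 in
lemma classify_eq (lc : List Char) :
    (if videoExts.any (fun ext => PySem.Str.endswith (PySem.Str.lower (String.ofList lc)) ext) then ("video" : String)
     else if imageExts.any (fun ext => PySem.Str.endswith (PySem.Str.lower (String.ofList lc)) ext) then "image"
     else "unknown")
    = (let u := PySem.Chars.lower lc
       let dot := PySem.Chars.rfind u ['.']
       let ext := if dot ≠ -1 then PySem.Chars.slice u (some (dot + 1)) none else []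
       if ext ∈ videoExtsB then ("video" : String)
       else if ext ∈ imageExtsB then "image"
       else "unknown") := by
  have hv : videoExtsB = [['m','p','4'], ['a','v','i'], ['m','o','v'], ['f','l','v'], ['w','m','v']] := by
    decide
  have hi : imageExtsB = [['j','p','g'], ['j','p','e','g'], ['p','n','g'], ['g','i','f'],
      ['b','m','p'], ['w','e','b','p']] := by decide
  simp only [videoExts, imageExts, List.any_cons, List.any_nil, PySem.Str.endswith_eq,
    PySem.Str.toList_lower, String.toList_ofList, hv, hi,
    show (".mp4" : String).toList = '.' :: "mp4".toList from rfl,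
    show (".avi" : String).toList = '.' :: "avi".toList from rfl,
    show (".mov" : String).toList = '.' :: "mov".toList from rfl,
    show (".flv" : String).toList = '.' :: "flv".toList from rfl,
    show (".wmv" : String).toList = '.' :: "wmv".toList from rfl,
    show (".jpg" : String).toList = '.' :: "jpg".toList from rfl,
    show (".jpeg" : String).toList = '.' :: "jpeg".toList from rfl,
    show (".png" : String).toList = '.' :: "png".toList from rfl,
    show (".gif" : String).toList = '.' :: "gif".toList from rfl,
    show (".bmp" : String).toList = '.' :: "bmp".toList from rfl,
    show (".webp" : String).toList = '.' :: "webp".toList from rfl]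
  by_cases hd : '.' ∈ PySem.Chars.lower lc
  · obtain ⟨p, hsplit, hnd⟩ := last_dot_split _ hd
    have hrf : PySem.Chars.rfind (PySem.Chars.lower lc) ['.'] = (p.length : Int) := by
      rw [hsplit]; exact rfind_last p _ hnd
    have hne : ((p.length : Int)) ≠ -1 := by omega
    have hslice : PySem.Chars.slice (PySem.Chars.lower lc) (some ((p.length : Int) + 1)) none
        = ((PySem.Chars.lower lc).reverse.takeWhile (fun c => (c ≠ '.' : Bool))).reverse := by
      rw [PySem.Chars.slice_eq_listSlice,
        show ((p.length : Int) + 1) = (((p.length + 1 : Nat)) : Int) by push_cast; ring,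
        PySem.List.slice_from_natCast]
      conv_lhs => rw [hsplit]
      rw [show p.length + 1 = p.length + (0 + 1) from rfl, ← List.drop_drop, List.drop_left]
      simp
    have hrw : ∀ e : List Char, '.' ∉ e →
        PySem.Chars.endswith (PySem.Chars.lower lc) ('.' :: e)
          = decide ((((PySem.Chars.lower lc).reverse.takeWhile
              (fun c => (c ≠ '.' : Bool))).reverse) = e) := by
      intro e hee
      have hee' : ∀ c ∈ e, c ≠ '.' := fun c hc heq => hee (heq ▸ hc)
      by_cases h : (((PySem.Chars.lower lc).reverse.takeWhile
          (fun c => (c ≠ '.' : Bool))).reverse) = e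
      · rw [(ends_iff _ _ hee').mpr ⟨hd, h⟩, decide_eq_true h]
      · rw [decide_eq_false h, Bool.eq_false_iff, Ne, ends_iff _ _ hee']
        exact fun hc => h hc.2
    simp only [hrf, hne, ne_eq, not_false_eq_true, if_true, hslice,
      hrw "mp4".toList (by simp), hrw "avi".toList (by simp), hrw "mov".toList (by simp),
      hrw "flv".toList (by simp), hrw "wmv".toList (by simp),
      hrw "jpg".toList (by simp), hrw "jpeg".toList (by simp), hrw "png".toList (by simp),
      hrw "gif".toList (by simp), hrw "bmp".toList (by simp), hrw "webp".toList (by simp)]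
    simp [List.mem_cons, Bool.or_eq_true, decide_eq_true_eq]
  · have hrf := rfind_no_dot _ hd
    have hrw0 : ∀ e : List Char, '.' ∉ e →
        PySem.Chars.endswith (PySem.Chars.lower lc) ('.' :: e) = false := by
      intro e hee
      rw [Bool.eq_false_iff, Ne, ends_iff _ _ (fun c hc heq => hee (heq ▸ hc))]
      exact fun hc => hd hc.1
    simp only [hrf, ne_eq, not_true_eq_false, if_false,
      hrw0 "mp4".toList (by simp), hrw0 "avi".toList (by simp), hrw0 "mov".toList (by simp),
      hrw0 "flv".toList (by simp), hrw0 "wmv".toList (by simp),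
      hrw0 "jpg".toList (by simp), hrw0 "jpeg".toList (by simp), hrw0 "png".toList (by simp),
      hrw0 "gif".toList (by simp), hrw0 "bmp".toList (by simp), hrw0 "webp".toList (by simp)]
    simp

lemma ofList_eq_none_iff (l : List Char) : String.ofList l = "None" ↔ l = "None".toList := by
  constructor
  · intro h
    have := congrArg String.toList h
    simpa using this
  · intro h; rw [h, String.ofList_toList]

lemma original_eq (c : List Char) :
    (if String.ofList c ≠ "None" then String.ofList c else "") =
      String.ofList (if c = "None".toList then [] else c) := by
  by_cases hn : c = "None".toList
  · rw [if_pos hn, if_neg (by simp [(ofList_eq_none_iff c).mpr hn])]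
  · rw [if_neg hn, if_pos (fun h => hn ((ofList_eq_none_iff c).mp h))]

-- per-item agreement: one step of A's loop appends exactly entryB item
lemma entry_eq (acc : List (List (String × String))) (item : String) :
    (let parts := pySplitSpace item
     if parts.length < 1 then acc
     else
      let local_url := parts.headD ""
      let original_url :=
        if parts.length > 1 then
          let original_url_candidate := (parts.drop 1).headD ""
          if original_url_candidate ≠ "None" then original_url_candidate else ""
        else ""
      let lower_local_url := PySem.Str.lower local_url
      let media_type :=
        if videoExts.any (fun ext => PySem.Str.endswith lower_local_url ext) then "video"
        else if imageExts.any (fun ext => PySem.Str.endswith lower_local_url ext) then "image"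
        else "unknown"
      acc ++ [[("type", media_type), ("local_url", local_url), ("original_url", original_url)]])
    = acc ++ [entryB item] := by
  have hparts : pySplitSpace item
      = (splitSp (PySem.Chars.strip item.toList)).map String.ofList := by
    unfold pySplitSpace; rw [splitOn_space]
  unfold entryB
  by_cases hsp : ' ' ∈ PySem.Chars.strip item.toList
  · have hsplit := splitSp_eq (PySem.Chars.strip item.toList)
    rw [if_pos hsp] at hsplit
    obtain ⟨ws, hws⟩ := splitSp_head ((PySem.Chars.strip item.toList).dropWhile
      (fun c => (c ≠ ' ' : Bool))).tail
    have hpart : pyPartitionSpace (PySem.Chars.strip item.toList)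
        = ((PySem.Chars.strip item.toList).takeWhile (fun c => (c ≠ ' ' : Bool)), [' '],
           ((PySem.Chars.strip item.toList).dropWhile (fun c => (c ≠ ' ' : Bool))).tail) := by
      unfold pyPartitionSpace; rw [if_pos hsp]
    simp only [hparts, hsplit, hws, hpart, part1_eq_takeWhile, List.map_cons, List.length_cons,
      List.drop_succ_cons, List.drop_zero, List.headD_cons]
    simp only [if_false,
      show ¬((ws.map String.ofList).length + 1 + 1 < 1) by omega,
      show (ws.map String.ofList).length + 1 + 1 > 1 by omega, if_true]
    rw [classify_eq, original_eq]
  · have hsplit := splitSp_eq (PySem.Chars.strip item.toList)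
    rw [if_neg hsp] at hsplit
    have hpart : pyPartitionSpace (PySem.Chars.strip item.toList)
        = (PySem.Chars.strip item.toList, [], []) := by
      unfold pyPartitionSpace; rw [if_neg hsp]
    have hpartnil : pyPartitionSpace ([] : List Char) = ([], [], []) := by
      unfold pyPartitionSpace; simp
    simp only [hparts, hsplit, hpart, hpartnil, List.map_cons, List.map_nil, List.length_cons,
      List.length_nil, List.headD_cons]
    simp only [show ¬(0 + 1 < 1) by omega, if_false]
    rw [classify_eq]
    simp [show String.ofList ([] : List Char) = "" from rfl]

lemma foldl_eq (l : List String) (acc : List (List (String × String))) :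
    l.foldl (fun media_sequence item =>
      let parts := pySplitSpace item
      if parts.length < 1 then media_sequence
      else
        let local_url := parts.headD ""
        let original_url :=
          if parts.length > 1 then
            let original_url_candidate := (parts.drop 1).headD ""
            if original_url_candidate ≠ "None" then original_url_candidate else ""
          else ""
        let lower_local_url := PySem.Str.lower local_url
        let media_type :=
          if videoExts.any (fun ext => PySem.Str.endswith lower_local_url ext) then "video"
          else if imageExts.any (fun ext => PySem.Str.endswith lower_local_url ext) then "image"
          else "unknown"
        media_sequence ++
          [[("type", media_type), ("local_url", local_url), ("original_url", original_url)]]) acc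
      = l.foldl (fun media_sequence item => media_sequence ++ [entryB item]) acc := by
  induction l generalizing acc with
  | nil => simp
  | cons x xs ih =>
    simp only [List.foldl_cons]
    rw [entry_eq acc x, ih]

-- ===== VERDICT (by name: the statement is the Claim_ definition above) =====
theorem parse_media_sequence_spec : Claim_equal_parse_media_sequence := by
  intro input_list _
  unfold Spec_parse_media_sequence parse_media_sequence parse_media_sequence_alt
  exact foldl_eq input_list []
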